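-- pv_equiv track=rewrite | github.com/TomBraggg/static-site-generator | mdconvert/htmlnode_utility.py | _trim_block
-- ===== SOURCE A (Python) =====
-- def _trim_block(block: str, blocktype: str) -> str:
--     match blocktype:
--         case "p":
--             return block
--         case "h1":
--             return block[2:]
--         case "h2":
--             return block[3:]
--         case "h3":
--             return block[4:]
--         case "h4":
--             return block[5:]
--         case "h5":
--             return block[6:]
--         case "h6":
--             return block[7:]
--         case "code":
--             return block[4:-3]
--         case "blockquote":
--             return block[2:]
--         case "ul":
--             trimmed_lines = []
--             for line in block.split("\n"):
--                 trimmed_line = f"<li>{line[2:]}</li>"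
--                 trimmed_lines.append(trimmed_line)
--             return "".join(trimmed_lines)
--         case "ol":
--             trimmed_lines = []
--             for line in block.split("\n"):
--                 trimmed_line = f"<li>{line[3:]}</li>"
--                 trimmed_lines.append(trimmed_line)
--             return "".join(trimmed_lines)
--         case _:
--             raise ValueError("BlockType not found")
-- ===== SOURCE B (Python) =====
-- def _trim_block(block: str, blocktype: str) -> str:
--     if blocktype == "p":
--         return block
--     if len(blocktype) == 2 and blocktype[0] == "h" and "1" <= blocktype[1] <= "6":
--         return block[ord(blocktype[1]) - 47:]
--     if blocktype == "blockquote":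
--         return block[2:]
--     if blocktype == "code":
--         return block[4:-3]
--     if blocktype == "ul" or blocktype == "ol":
--         skip = 2 if blocktype == "ul" else 3
--         out = ["<li>"]
--         pos = 0
--         for ch in block:
--             if ch == "\n":
--                 out.append("</li><li>")
--                 pos = 0
--             else:
--                 if pos >= skip:
--                     out.append(ch)
--                 pos += 1
--         return "".join(out) + "</li>"
--     raise ValueError("BlockType not found")
-- ===== Notes on version B (the rewrite author's own statement) =====
-- stated objective: alternative
-- what changed: B computes the heading offset arithmetically from the digit in the blocktype instead of enumerating h1..h6, and builds ul/ol output in a single character-level state machine over the block (tracking position within the current line, emitting '</li><li>' at each newline) instead of splitting into lines and wrapping each with an append loop.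
import Mathlib
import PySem

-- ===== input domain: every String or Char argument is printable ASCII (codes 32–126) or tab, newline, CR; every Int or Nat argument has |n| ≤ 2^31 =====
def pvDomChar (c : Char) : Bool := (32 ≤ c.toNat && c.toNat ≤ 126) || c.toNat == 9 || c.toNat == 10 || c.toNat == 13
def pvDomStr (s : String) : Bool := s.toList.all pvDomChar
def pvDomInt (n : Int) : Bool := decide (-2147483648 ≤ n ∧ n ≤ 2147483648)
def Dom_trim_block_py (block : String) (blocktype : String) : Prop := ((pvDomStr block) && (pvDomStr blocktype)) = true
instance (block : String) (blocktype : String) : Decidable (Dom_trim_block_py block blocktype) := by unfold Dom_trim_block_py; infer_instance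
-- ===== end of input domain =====

-- B computes the heading offset from the digit of the blocktype and renders ul/ol in one
-- character-level pass (a state machine over the block) instead of split-map-join; alternative decomposition, same cost.

-- ===== PORT A =====
def trim_block_py (block : String) (blocktype : String) : String :=
  if blocktype == "p" then block
  else if blocktype == "h1" then PySem.Str.slice block (some 2) none
  else if blocktype == "h2" then PySem.Str.slice block (some 3) none
  else if blocktype == "h3" then PySem.Str.slice block (some 4) none
  else if blocktype == "h4" then PySem.Str.slice block (some 5) none
  else if blocktype == "h5" then PySem.Str.slice block (some 6) none
  else if blocktype == "h6" then PySem.Str.slice block (some 7) none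
  else if blocktype == "code" then PySem.Str.slice block (some 4) (some (-3))
  else if blocktype == "blockquote" then PySem.Str.slice block (some 2) none
  else if blocktype == "ul" then
    PySem.Str.join "" (((PySem.Str.split? block "\n").getD []).foldl
      (fun acc line => acc ++ ["<li>" ++ PySem.Str.slice line (some 2) none ++ "</li>"]) [])
  else if blocktype == "ol" then
    PySem.Str.join "" (((PySem.Str.split? block "\n").getD []).foldl
      (fun acc line => acc ++ ["<li>" ++ PySem.Str.slice line (some 3) none ++ "</li>"]) [])
  else ""  -- raise ValueError("BlockType not found"): excluded by Pre_

-- ===== PORT B =====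
-- len(blocktype) == 2 and blocktype[0] == 'h' and '1' <= blocktype[1] <= '6' → ord(blocktype[1]) - 47
def pvHeadOff? (blocktype : String) : Option Int :=
  match blocktype.toList with
  | ['h', d] => if '1' ≤ d && d ≤ '6' then some ((d.toNat : Int) - 47) else none
  | _ => none

-- one step of B's character state machine for ul/ol: (pieces so far, position within current line)
def pvStreamStep (skip : Int) (st : List String × Int) (ch : Char) : List String × Int :=
  if ch == '\n' then (st.1 ++ ["</li><li>"], 0)
  else ((if skip ≤ st.2 then st.1 ++ [String.ofList [ch]] else st.1), st.2 + 1)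

def pvRest (block : String) (blocktype : String) : String :=
  if blocktype == "blockquote" then PySem.Str.slice block (some 2) none
  else if blocktype == "code" then PySem.Str.slice block (some 4) (some (-3))
  else if blocktype == "ul" || blocktype == "ol" then
    let skip : Int := if blocktype == "ul" then 2 else 3
    let st := block.toList.foldl (pvStreamStep skip) (["<li>"], 0)
    PySem.Str.join "" st.1 ++ "</li>"
  else ""  -- raise ValueError("BlockType not found"): excluded by Pre_

def trim_block_py_alt (block : String) (blocktype : String) : String :=
  if blocktype == "p" then block
  else
    match pvHeadOff? blocktype with
    | some off => PySem.Str.slice block (some off) none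
    | none => pvRest block blocktype

-- ===== PRECONDITION & SPEC =====
-- Pre_ excludes exactly the unknown blocktypes, on which A (and B) raise ValueError.
def Pre_trim_block_py (block : String) (blocktype : String) : Prop :=
  blocktype ∈ (["p", "h1", "h2", "h3", "h4", "h5", "h6", "code", "blockquote", "ul", "ol"] : List String)
instance (block : String) (blocktype : String) : Decidable (Pre_trim_block_py block blocktype) := by
  unfold Pre_trim_block_py; infer_instance

def pvWitness_trim_block_py : String × String := ("- a\n- b", "ul")

def Spec_trim_block_py (block : String) (blocktype : String) (out : String) : Prop := out = trim_block_py_alt block blocktype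
instance (block : String) (blocktype : String) (out : String) : Decidable (Spec_trim_block_py block blocktype out) := by unfold Spec_trim_block_py; infer_instance

-- ===== CLAIM (what is proved, stated in full; the proofs are below) =====
def Claim_equal_trim_block_py : Prop := ∀ (block : String) (blocktype : String), Dom_trim_block_py block blocktype → Pre_trim_block_py block blocktype → Spec_trim_block_py block blocktype (trim_block_py block blocktype)

-- ===== LEMMAS AND PROOFS =====

-- A's append loop is a map
theorem foldl_snoc {α β : Type} (g : α → β) (xs : List α) (acc : List β) :
    xs.foldl (fun a x => a ++ [g x]) acc = acc ++ xs.map g := by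
  induction xs generalizing acc with
  | nil => simp
  | cons x t ih => simp [List.foldl, ih]

-- proof-side model of splitting on '\n'
def pvLines : List Char → List (List Char)
  | [] => [[]]
  | c :: cs =>
    if c == '\n' then [] :: pvLines cs
    else
      match pvLines cs with
      | [] => [[c]]
      | h :: t => (c :: h) :: t

theorem pvLines_ne_nil (cs : List Char) : pvLines cs ≠ [] := by
  cases cs with
  | nil => simp [pvLines]
  | cons c rest =>
    simp only [pvLines]
    split
    · simp
    · split <;> simp

theorem splitOn_go_lines :
    ∀ (cs : List Char) (fuel : Nat), cs.length ≤ fuel → ∀ (cur : List Char) (acc : List (List Char))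
      (h : List Char) (t : List (List Char)), pvLines cs = h :: t →
      PySem.Chars.splitOn.go ['\n'] fuel cs cur acc = acc.reverse ++ (cur.reverse ++ h) :: t := by
  intro cs
  induction cs with
  | nil =>
    intro fuel _ cur acc h t hl
    rw [show pvLines [] = [[]] from rfl] at hl
    injection hl with e1 e2; subst e1; subst e2
    cases fuel <;> simp [PySem.Chars.splitOn.go]
  | cons c rest ih =>
    intro fuel hfuel cur acc h t hl
    cases fuel with
    | zero => simp at hfuel
    | succ f =>
      have hf : rest.length ≤ f := by simp only [List.length_cons] at hfuel; omega
      have hpref : (List.isPrefixOf ['\n'] (c :: rest)) = ('\n' == c) := by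
        simp [List.isPrefixOf]
      rw [PySem.Chars.splitOn.go]
      obtain ⟨h', t', hlr⟩ := List.exists_cons_of_ne_nil (pvLines_ne_nil rest)
      by_cases hc : c = '\n'
      · subst hc
        rw [if_pos (by simp [hpref])]
        rw [show pvLines ('\n' :: rest) = [] :: pvLines rest from by simp [pvLines], hlr] at hl
        injection hl with e1 e2; subst e1; subst e2
        have hgo := ih f hf [] (cur.reverse :: acc) h' t' hlr
        simp only [List.length_cons, List.length_nil, List.drop_succ_cons, List.drop_zero]
        rw [hgo]; simp
      · rw [if_neg (by simp only [hpref, beq_iff_eq]; exact fun e => hc e.symm)]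
        rw [show pvLines (c :: rest)
            = if c == '\n' then [] :: pvLines rest
              else match pvLines rest with | [] => [[c]] | h :: t => (c :: h) :: t from rfl] at hl
        rw [if_neg (by simpa using hc), hlr] at hl
        injection hl with e1 e2; subst e1; subst e2
        have hgo := ih f hf (c :: cur) acc h' t' hlr
        rw [hgo]; simp

theorem splitOn_eq_pvLines (cs : List Char) :
    PySem.Chars.splitOn cs ['\n'] = pvLines cs := by
  obtain ⟨h, t, hl⟩ := List.exists_cons_of_ne_nil (pvLines_ne_nil cs)
  rw [PySem.Chars.splitOn, splitOn_go_lines cs (cs.length + 1) (by omega) [] [] h t hl, hl]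
  simp

-- the characters B emits between the outer '<li>' … '</li>'
def pvEmit (skip : Int) : List Char → Int → List Char
  | [], _ => []
  | c :: cs, pos =>
    if c == '\n' then "</li><li>".toList ++ pvEmit skip cs 0
    else (if skip ≤ pos then [c] else []) ++ pvEmit skip cs (pos + 1)

theorem stream_flat (skip : Int) :
    ∀ (cs : List Char) (acc : List String) (pos : Int),
      ((cs.foldl (pvStreamStep skip) (acc, pos)).1).flatMap String.toList
        = acc.flatMap String.toList ++ pvEmit skip cs pos := by
  intro cs
  induction cs with
  | nil => intro acc pos; simp [pvEmit]
  | cons c rest ih =>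
    intro acc pos
    simp only [List.foldl_cons, pvStreamStep, pvEmit]
    by_cases hc : c == '\n'
    · rw [if_pos hc, if_pos hc, ih]; simp
    · rw [if_neg hc, if_neg hc]
      by_cases hp : skip ≤ pos
      · rw [if_pos hp, if_pos hp, ih]; simp
      · rw [if_neg hp, if_neg hp, ih]; simp

theorem emit_lines (k : Nat) :
    ∀ (cs : List Char) (pos : Int), 0 ≤ pos →
      ∀ (h : List Char) (t : List (List Char)), pvLines cs = h :: t →
      pvEmit (k : Int) cs pos
        = h.drop ((k : Int) - pos).toNat ++ t.flatMap (fun l => "</li><li>".toList ++ l.drop k) := by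
  intro cs
  induction cs with
  | nil =>
    intro pos _ h t hl
    rw [show pvLines [] = [[]] from rfl] at hl
    injection hl with e1 e2; subst e1; subst e2
    simp [pvEmit]
  | cons c rest ih =>
    intro pos hpos h t hl
    simp only [pvEmit]
    by_cases hc : c == '\n'
    · rw [if_pos hc]
      obtain ⟨h', t', hlr⟩ := List.exists_cons_of_ne_nil (pvLines_ne_nil rest)
      rw [show pvLines (c :: rest)
          = if c == '\n' then [] :: pvLines rest
            else match pvLines rest with | [] => [[c]] | h :: t => (c :: h) :: t from rfl,
        if_pos hc, hlr] at hl
      injection hl with e1 e2; subst e1; subst e2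
      rw [ih 0 le_rfl h' t' hlr]
      simp
    · rw [if_neg hc]
      obtain ⟨h', t', hlr⟩ := List.exists_cons_of_ne_nil (pvLines_ne_nil rest)
      rw [show pvLines (c :: rest)
          = if c == '\n' then [] :: pvLines rest
            else match pvLines rest with | [] => [[c]] | h :: t => (c :: h) :: t from rfl,
        if_neg hc, hlr] at hl
      injection hl with e1 e2; subst e1; subst e2
      rw [ih (pos + 1) (by omega) h' t' hlr]
      by_cases hp : (k : Int) ≤ pos
      · rw [if_pos hp]
        have h1 : ((k : Int) - pos).toNat = 0 := by omega
        have h2 : ((k : Int) - (pos + 1)).toNat = 0 := by omega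
        simp [h1, h2]
      · rw [if_neg hp]
        have h1 : ((k : Int) - pos).toNat = ((k : Int) - (pos + 1)).toNat + 1 := by omega
        simp [h1]

theorem join_nil_flatten : ∀ (l : List (List Char)), PySem.Chars.join [] l = l.flatten
  | [] => by simp [PySem.Chars.join, List.intercalate]
  | [a] => by rw [PySem.Chars.join_singleton]; simp
  | a :: b :: t => by
    rw [PySem.Chars.join_cons_cons, join_nil_flatten (b :: t)]; simp

theorem sep_shift (li il : List Char) (d : List Char → List Char) :
    ∀ (t : List (List Char)),
      il ++ t.flatMap (fun l => li ++ d l ++ il) = t.flatMap (fun l => il ++ li ++ d l) ++ il := by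
  intro t
  induction t with
  | nil => simp
  | cons a t ih =>
    simp only [List.flatMap_cons, List.append_assoc] at ih ⊢
    rw [ih]

-- the common value of both ul/ol renderings, at the character level
theorem ul_ol_eq (block : String) (k : Nat) :
    PySem.Str.join "" (((PySem.Str.split? block "\n").getD []).foldl
      (fun acc line => acc ++ ["<li>" ++ PySem.Str.slice line (some (k : Int)) none ++ "</li>"]) [])
    = PySem.Str.join "" (block.toList.foldl (pvStreamStep (k : Int)) (["<li>"], 0)).1 ++ "</li>" := by
  obtain ⟨h, t, hl⟩ := List.exists_cons_of_ne_nil (pvLines_ne_nil block.toList)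
  rw [← String.toList_inj]
  have hsplit : PySem.Str.split? block "\n" = some ((pvLines block.toList).map String.ofList) := by
    simp only [PySem.Str.split?, PySem.Chars.split?]
    rw [show ("\n" : String).toList = ['\n'] from by decide]
    simp [splitOn_eq_pvLines]
  rw [hsplit, Option.getD_some, foldl_snoc]
  simp only [String.toList_append, PySem.Str.toList_join, List.map_map, List.nil_append,
    Function.comp_def, PySem.Str.toList_slice, String.toList_ofList]
  rw [show ("" : String).toList = ([] : List Char) from rfl, join_nil_flatten, join_nil_flatten,
    ← List.flatMap_def, ← List.flatMap_def, stream_flat,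
    emit_lines k block.toList 0 le_rfl h t hl, hl]
  simp only [List.flatMap_cons, List.flatMap_nil, List.append_nil, Int.sub_zero, Int.toNat_natCast]
  rw [show ("</li><li>" : String).toList = ("</li>" : String).toList ++ ("<li>" : String).toList from by decide]
  have hsl : ∀ (l : List Char), PySem.Chars.slice l (some (k : Int)) none = l.drop k :=
    fun l => PySem.List.slice_from_natCast l k
  have hs := sep_shift ("<li>" : String).toList ("</li>" : String).toList (fun l => l.drop k) t
  simp only [List.append_assoc] at hs
  simp only [hsl, List.append_assoc]
  rw [hs]

-- ===== VERDICT (by name: the statement is the Claim_ definition above) =====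
theorem trim_block_py_spec : Claim_equal_trim_block_py := by
  intro block blocktype _ hpre
  unfold Spec_trim_block_py
  simp only [Pre_trim_block_py, List.mem_cons, List.not_mem_nil, or_false] at hpre
  rcases hpre with rfl|rfl|rfl|rfl|rfl|rfl|rfl|rfl|rfl|rfl|rfl
  · simp [trim_block_py, trim_block_py_alt]
  · rw [show trim_block_py_alt block "h1" = PySem.Str.slice block (some 2) none from by
      simp [trim_block_py_alt, show pvHeadOff? "h1" = some 2 from by decide]]
    simp [trim_block_py]
  · rw [show trim_block_py_alt block "h2" = PySem.Str.slice block (some 3) none from by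
      simp [trim_block_py_alt, show pvHeadOff? "h2" = some 3 from by decide]]
    simp [trim_block_py]
  · rw [show trim_block_py_alt block "h3" = PySem.Str.slice block (some 4) none from by
      simp [trim_block_py_alt, show pvHeadOff? "h3" = some 4 from by decide]]
    simp [trim_block_py]
  · rw [show trim_block_py_alt block "h4" = PySem.Str.slice block (some 5) none from by
      simp [trim_block_py_alt, show pvHeadOff? "h4" = some 5 from by decide]]
    simp [trim_block_py]
  · rw [show trim_block_py_alt block "h5" = PySem.Str.slice block (some 6) none from by
      simp [trim_block_py_alt, show pvHeadOff? "h5" = some 6 from by decide]]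
    simp [trim_block_py]
  · rw [show trim_block_py_alt block "h6" = PySem.Str.slice block (some 7) none from by
      simp [trim_block_py_alt, show pvHeadOff? "h6" = some 7 from by decide]]
    simp [trim_block_py]
  · rw [show trim_block_py_alt block "code" = PySem.Str.slice block (some 4) (some (-3)) from by
      simp [trim_block_py_alt, pvRest, show pvHeadOff? "code" = none from by decide]]
    simp [trim_block_py]
  · rw [show trim_block_py_alt block "blockquote" = PySem.Str.slice block (some 2) none from by
      simp [trim_block_py_alt, pvRest, show pvHeadOff? "blockquote" = none from by decide]]
    simp [trim_block_py]
  · rw [show trim_block_py_alt block "ul"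
        = PySem.Str.join "" (block.toList.foldl (pvStreamStep ((2 : Nat) : Int)) (["<li>"], 0)).1 ++ "</li>" from by
      simp [trim_block_py_alt, pvRest, show pvHeadOff? "ul" = none from by decide]]
    simp only [trim_block_py, show (("ul":String) == "p") = false from by decide, show (("ul":String) == "h1") = false from by decide, show (("ul":String) == "h2") = false from by decide, show (("ul":String) == "h3") = false from by decide, show (("ul":String) == "h4") = false from by decide, show (("ul":String) == "h5") = false from by decide, show (("ul":String) == "h6") = false from by decide, show (("ul":String) == "code") = false from by decide, show (("ul":String) == "blockquote") = false from by decide, Bool.false_eq_true, if_false, beq_self_eq_true, if_true]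
    exact ul_ol_eq block 2
  · rw [show trim_block_py_alt block "ol"
        = PySem.Str.join "" (block.toList.foldl (pvStreamStep ((3 : Nat) : Int)) (["<li>"], 0)).1 ++ "</li>" from by
      simp [trim_block_py_alt, pvRest, show pvHeadOff? "ol" = none from by decide]]
    simp only [trim_block_py, show (("ol":String) == "p") = false from by decide, show (("ol":String) == "h1") = false from by decide, show (("ol":String) == "h2") = false from by decide, show (("ol":String) == "h3") = false from by decide, show (("ol":String) == "h4") = false from by decide, show (("ol":String) == "h5") = false from by decide, show (("ol":String) == "h6") = false from by decide, show (("ol":String) == "code") = false from by decide, show (("ol":String) == "blockquote") = false from by decide, show (("ol":String) == "ul") = false from by decide, Bool.false_eq_true, if_false, beq_self_eq_true, if_true]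
    exact ul_ol_eq block 3
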